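-- pv_equiv track=rewrite | github.com/ElnurBDa/my-python-projects | Interesting projekts/useful.py | arePermutation2
-- ===== SOURCE A (Python) =====
-- def arePermutation2(a,b):
--     a=str(a)
--     b=str(b)
--     l=len(a)
--
--     if l!=len(b):return False
--
--     count=[0]*10
--
--     for i in range(l):
--         count[int(a[i])]+=1
--         count[int(b[i])]-=1
--
--     for x in count:
--         if x!=0: return False
--
--     return True
-- ===== SOURCE B (Python) =====
-- def arePermutation2(a, b):
--     a = str(a)
--     b = str(b)
--     return len(a) == len(b) and sorted(a) == sorted(b)
-- ===== Notes on version B (the rewrite author's own statement) =====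
-- stated objective: idiomatic
-- what changed: Replaces A's per-digit counting array (per-character int() conversions, two indexed updates per position, then a zero scan) with the idiomatic one-liner: a length check followed by comparing the two sorted character lists.
-- crash fix: On two negative (or one negative, equal-string-length) inputs A raises ValueError at int('-'); B returns the sorted-character comparison, e.g. True on (-12, -21). — e.g. on arePermutation2(-12, -21): A raises ValueError, B returns true
import Mathlib
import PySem

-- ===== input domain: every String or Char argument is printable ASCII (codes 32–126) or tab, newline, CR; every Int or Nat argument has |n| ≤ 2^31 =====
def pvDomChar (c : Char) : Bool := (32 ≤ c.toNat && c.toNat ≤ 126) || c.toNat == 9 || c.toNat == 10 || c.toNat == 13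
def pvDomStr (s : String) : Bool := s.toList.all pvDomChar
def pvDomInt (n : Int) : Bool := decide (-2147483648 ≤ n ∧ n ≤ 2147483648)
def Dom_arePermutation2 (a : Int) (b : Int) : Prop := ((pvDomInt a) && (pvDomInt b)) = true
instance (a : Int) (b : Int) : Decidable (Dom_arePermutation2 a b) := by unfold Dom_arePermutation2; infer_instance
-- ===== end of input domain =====

-- B replaces A's digit-counting array with a length check plus comparison of the two sorted
-- character lists (idiomatic; no speed claim).

-- ===== PORT A =====
-- int(c) for a one-character string; total form: under Pre_ every indexed character is a
-- decimal digit, on which PySem.Int.ofChars? is `some` (outside Pre_ Python raises ValueError).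
def pvDigit (c : Char) : Int := (PySem.Int.ofChars? [c]).getD 0

def arePermutation2 (a : Int) (b : Int) : Bool :=
  let sa := PySem.Int.toChars a          -- a = str(a)
  let sb := PySem.Int.toChars b          -- b = str(b)
  let l : Int := PySem.List.len sa       -- l = len(a)
  if l ≠ PySem.List.len sb then false    -- if l != len(b): return False
  else
    -- count = [0]*10; for i in range(l): count[int(a[i])] += 1; count[int(b[i])] -= 1
    let count : List Int := List.replicate 10 0
    let count := (PySem.List.pyRange 0 l 1).foldl (fun c i =>
      let c1 := PySem.List.pySetD c (pvDigit (PySem.List.pyGetD sa i ' '))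
                  (PySem.List.pyGetD c (pvDigit (PySem.List.pyGetD sa i ' ')) 0 + 1)
      PySem.List.pySetD c1 (pvDigit (PySem.List.pyGetD sb i ' '))
                  (PySem.List.pyGetD c1 (pvDigit (PySem.List.pyGetD sb i ' ')) 0 - 1)) count
    -- for x in count: if x != 0: return False
    count.all (fun x => x == 0)          -- return True

-- ===== PORT B =====
def arePermutation2_alt (a : Int) (b : Int) : Bool :=
  let sa := PySem.Int.toChars a
  let sb := PySem.Int.toChars b
  -- len(a) == len(b) and sorted(a) == sorted(b)
  decide (sa.length = sb.length) &&
    decide (PySem.List.sorted sa (fun x => x) false = PySem.List.sorted sb (fun x => x) false)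

-- ===== PRECONDITION & SPEC =====
-- Pre_ excludes exactly the inputs where A raises ValueError: a negative argument puts a '-'
-- in the string, and when the two strings have equal length A reaches int('-').
def Pre_arePermutation2 (a : Int) (b : Int) : Prop :=
  (0 ≤ a ∧ 0 ≤ b) ∨ (PySem.Int.toChars a).length ≠ (PySem.Int.toChars b).length
instance (a : Int) (b : Int) : Decidable (Pre_arePermutation2 a b) := by
  unfold Pre_arePermutation2; infer_instance

def pvWitness_arePermutation2 : Int × Int := (12, 21)

-- A raises ValueError (int('-')) whenever an argument is negative and the two strings have
-- equal length; B returns the sorted-character comparison there, e.g. True on (-12, -21).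
def Raises_arePermutation2 (a : Int) (b : Int) : Prop :=
  (a < 0 ∨ b < 0) ∧ (PySem.Int.toChars a).length = (PySem.Int.toChars b).length
instance (a : Int) (b : Int) : Decidable (Raises_arePermutation2 a b) := by
  unfold Raises_arePermutation2; infer_instance
def pvRaiseWitness_arePermutation2 : Int × Int := (-12, -21)
def pvRaiseWitnessOut_arePermutation2 : Bool := true

def Spec_arePermutation2 (a : Int) (b : Int) (out : Bool) : Prop := out = arePermutation2_alt a b
instance (a : Int) (b : Int) (out : Bool) : Decidable (Spec_arePermutation2 a b out) := by
  unfold Spec_arePermutation2; infer_instance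

-- ===== CLAIM (what is proved, stated in full; the proofs are below) =====
def Claim_equal_arePermutation2 : Prop := ∀ (a : Int) (b : Int), Dom_arePermutation2 a b → Pre_arePermutation2 a b → Spec_arePermutation2 a b (arePermutation2 a b)
def Claim_raises_arePermutation2 : Prop := (∀ (a : Int) (b : Int), Dom_arePermutation2 a b → Raises_arePermutation2 a b → ¬ Pre_arePermutation2 a b) ∧ (Dom_arePermutation2 (pvRaiseWitness_arePermutation2.1) (pvRaiseWitness_arePermutation2.2) ∧ Raises_arePermutation2 (pvRaiseWitness_arePermutation2.1) (pvRaiseWitness_arePermutation2.2) ∧ arePermutation2_alt (pvRaiseWitness_arePermutation2.1) (pvRaiseWitness_arePermutation2.2) = pvRaiseWitnessOut_arePermutation2)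

-- ===== LEMMAS AND PROOFS =====

-- the ten decimal digit characters
def pvDIGS : List Char := ['0','1','2','3','4','5','6','7','8','9']

-- one loop iteration of A, on the pair of characters it reads
def pvStep (c : List Int) (x y : Char) : List Int :=
  let c1 := PySem.List.pySetD c (pvDigit x) (PySem.List.pyGetD c (pvDigit x) 0 + 1)
  PySem.List.pySetD c1 (pvDigit y) (PySem.List.pyGetD c1 (pvDigit y) 0 - 1)

theorem pv_toDigitsCore_digs : ∀ (f n : Nat) (ds : List Char),
    (∀ c ∈ ds, c ∈ pvDIGS) → ∀ c ∈ Nat.toDigitsCore 10 f n ds, c ∈ pvDIGS := by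
  intro f
  induction f with
  | zero => intro n ds hds; simpa [Nat.toDigitsCore] using hds
  | succ f ih =>
    intro n ds hds c hc
    have hd : (n % 10).digitChar ∈ pvDIGS := by
      have h10 : n % 10 < 10 := Nat.mod_lt _ (by norm_num)
      set m := n % 10 with hm
      interval_cases m <;> decide
    rw [Nat.toDigitsCore] at hc
    by_cases hz : n / 10 = 0
    · simp [hz] at hc
      rcases hc with h | h
      · subst h; exact hd
      · exact hds c h
    · simp [hz] at hc
      refine ih (n/10) _ ?_ c hc
      intro c' hc'
      rcases List.mem_cons.mp hc' with rfl | h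
      · exact hd
      · exact hds c' h

theorem pv_toChars_digs (n : Int) (h : 0 ≤ n) : ∀ c ∈ PySem.Int.toChars n, c ∈ pvDIGS := by
  unfold PySem.Int.toChars
  rw [if_neg (by omega)]
  unfold Nat.toDigits
  exact pv_toDigitsCore_digs _ _ _ (by simp)

theorem pv_pvDigit_idx (c : Char) (h : c ∈ pvDIGS) : pvDigit c = (pvDIGS.idxOf c : Int) := by
  fin_cases h <;> decide

theorem pv_idx_lt (c : Char) (h : c ∈ pvDIGS) : pvDIGS.idxOf c < 10 := by
  fin_cases h <;> decide

theorem pv_digs_getD_eq_iff (k : Nat) (hk : k < 10) (x : Char) (hx : x ∈ pvDIGS) :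
    (pvDIGS.getD k ' ' = x) ↔ k = pvDIGS.idxOf x := by
  interval_cases k <;> fin_cases hx <;> decide

theorem pv_getD_set (l : List Int) (n k : Nat) (v : Int) (h : n < l.length) :
    (l.set n v).getD k 0 = if k = n then v else l.getD k 0 := by
  unfold List.getD
  rw [List.getElem?_set]
  by_cases hk : n = k
  · subst hk; simp [h]
  · simp [hk, Ne.symm hk]

theorem pv_step_getD (c : List Int) (hc : c.length = 10) (x y : Char)
    (hx : x ∈ pvDIGS) (hy : y ∈ pvDIGS) (k : Nat) (hk : k < 10) :
    (pvStep c x y).getD k 0 = c.getD k 0 + (if k = pvDIGS.idxOf x then 1 else 0)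
      - (if k = pvDIGS.idxOf y then 1 else 0) := by
  have hx' := pv_idx_lt x hx
  have hy' := pv_idx_lt y hy
  simp only [pvStep, pv_pvDigit_idx x hx, pv_pvDigit_idx y hy,
    PySem.List.pySetD_natCast, PySem.List.pyGetD_natCast]
  set n1 := List.idxOf x pvDIGS with hn1
  set n2 := List.idxOf y pvDIGS with hn2
  rw [pv_getD_set _ _ _ _ (by simpa using by omega), pv_getD_set _ _ _ _ (by omega),
      pv_getD_set _ _ _ _ (by omega)]
  split_ifs <;> simp_all

theorem pv_step_length (c : List Int) (x y : Char) : (pvStep c x y).length = c.length := by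
  simp [pvStep, PySem.List.length_pySetD]

theorem pv_foldl_step_length (ps : List (Char × Char)) : ∀ (c : List Int),
    (ps.foldl (fun c p => pvStep c p.1 p.2) c).length = c.length := by
  induction ps with
  | nil => intro c; rfl
  | cons p ps ih => intro c; simp [List.foldl_cons, ih, pv_step_length]

theorem pv_range_to_zip (sa : List Char) : ∀ (sb : List Char), sb.length = sa.length →
    ∀ (init : List Int),
    (PySem.List.pyRange 0 (PySem.List.len sa) 1).foldl
      (fun c i => pvStep c (PySem.List.pyGetD sa i ' ') (PySem.List.pyGetD sb i ' ')) init
    = (sa.zip sb).foldl (fun c p => pvStep c p.1 p.2) init := by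
  have key : ∀ (ta : List Char) (tb : List Char), tb.length = ta.length → ∀ (init : List Int),
      (List.range ta.length).foldl (fun c k => pvStep c (ta.getD k ' ') (tb.getD k ' ')) init
      = (ta.zip tb).foldl (fun c p => pvStep c p.1 p.2) init := by
    intro ta
    induction ta with
    | nil => intro tb h init; simp
    | cons x ta ih =>
      intro tb h init
      cases tb with
      | nil => simp at h
      | cons y tb =>
        simp only [List.length_cons] at h
        simp only [List.length_cons, List.range_succ_eq_map, List.foldl_cons, List.foldl_map,
          List.getD_cons_zero, List.getD_cons_succ, List.zip_cons_cons]
        exact ih tb (by omega) _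
  intro sb h init
  rw [PySem.List.len_eq, PySem.List.pyRange_zero_nat, List.foldl_map]
  simp only [PySem.List.pyGetD_natCast]
  exact key sa sb h init

theorem pv_count_inv (ps : List (Char × Char)) : ∀ (c : List Int), c.length = 10 →
    (∀ p ∈ ps, p.1 ∈ pvDIGS ∧ p.2 ∈ pvDIGS) → ∀ k, k < 10 →
    (ps.foldl (fun c p => pvStep c p.1 p.2) c).getD k 0
      = c.getD k 0 + ((ps.map Prod.fst).count (pvDIGS.getD k ' ') : Int)
                   - ((ps.map Prod.snd).count (pvDIGS.getD k ' ') : Int) := by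
  induction ps with
  | nil => intro c hc hd k hk; simp
  | cons p ps ih =>
    intro c hc hd k hk
    obtain ⟨hx, hy⟩ := hd p (List.mem_cons_self)
    rw [List.foldl_cons,
        ih (pvStep c p.1 p.2) (by rw [pv_step_length, hc]) (fun q hq => hd q (List.mem_cons_of_mem _ hq)) k hk,
        pv_step_getD c hc p.1 p.2 hx hy k hk]
    simp only [List.map_cons, List.count_cons, beq_iff_eq]
    have e1 : (p.1 = pvDIGS.getD k ' ') ↔ k = pvDIGS.idxOf p.1 := by
      rw [eq_comm]; exact pv_digs_getD_eq_iff k hk p.1 hx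
    have e2 : (p.2 = pvDIGS.getD k ' ') ↔ k = pvDIGS.idxOf p.2 := by
      rw [eq_comm]; exact pv_digs_getD_eq_iff k hk p.2 hy
    rw [if_congr e1 rfl rfl, if_congr e2 rfl rfl]
    push_cast
    split_ifs <;> omega

theorem pv_perm_iff_counts (sa sb : List Char)
    (ha : ∀ c ∈ sa, c ∈ pvDIGS) (hb : ∀ c ∈ sb, c ∈ pvDIGS) :
    sa.Perm sb ↔ ∀ k, k < 10 → sa.count (pvDIGS.getD k ' ') = sb.count (pvDIGS.getD k ' ') := by
  constructor
  · intro hp k _; exact hp.count_eq _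
  · intro h
    rw [List.perm_iff_count]
    intro x
    by_cases hx : x ∈ pvDIGS
    · have hlt : pvDIGS.idxOf x < 10 := pv_idx_lt x hx
      have hgd : pvDIGS.getD (pvDIGS.idxOf x) ' ' = x := by
        fin_cases hx <;> decide
      rw [← hgd]
      exact h _ hlt
    · rw [List.count_eq_zero_of_not_mem (fun hmem => hx (ha x hmem)),
          List.count_eq_zero_of_not_mem (fun hmem => hx (hb x hmem))]

-- ===== VERDICT (by name: the statement is the Claim_ definition above) =====
theorem arePermutation2_spec : Claim_equal_arePermutation2 := by
  intro a b _ hpre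
  unfold Spec_arePermutation2 arePermutation2 arePermutation2_alt
  by_cases hlen : (PySem.Int.toChars a).length = (PySem.Int.toChars b).length
  · -- equal string lengths: by Pre_, both arguments are nonnegative and all characters digits
    obtain ⟨ha0, hb0⟩ : 0 ≤ a ∧ 0 ≤ b := by
      rcases hpre with h | h
      · exact h
      · exact absurd hlen h
    set sa := PySem.Int.toChars a with hsa
    set sb := PySem.Int.toChars b with hsb
    have hda := pv_toChars_digs a ha0
    have hdb := pv_toChars_digs b hb0
    rw [if_neg (by simp [PySem.List.len_eq, hlen])]
    show ((PySem.List.pyRange 0 (PySem.List.len sa) 1).foldl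
        (fun c i => pvStep c (PySem.List.pyGetD sa i ' ') (PySem.List.pyGetD sb i ' '))
        (List.replicate 10 0)).all (fun x => x == 0) = _
    rw [pv_range_to_zip sa sb hlen.symm]
    set ps := sa.zip sb with hps
    have hdp : ∀ p ∈ ps, p.1 ∈ pvDIGS ∧ p.2 ∈ pvDIGS := by
      intro p hp
      obtain ⟨h1, h2⟩ := List.of_mem_zip (a := p.1) (b := p.2) hp
      exact ⟨hda _ h1, hdb _ h2⟩
    set final := ps.foldl (fun c p => pvStep c p.1 p.2) (List.replicate 10 0) with hfinal
    have hflen : final.length = 10 := by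
      rw [hfinal, pv_foldl_step_length]; simp
    have hinv := pv_count_inv ps (List.replicate 10 0) (by simp) hdp
    have hmf : ps.map Prod.fst = sa := List.map_fst_zip (by omega)
    have hms : ps.map Prod.snd = sb := List.map_snd_zip (by omega)
    have hAiff : final.all (fun x => x == 0) = true ↔ sa.Perm sb := by
      rw [List.all_eq_true]
      constructor
      · intro hz
        rw [pv_perm_iff_counts sa sb hda hdb]
        intro k hk
        have hg : final.getD k 0 = 0 := by
          rw [List.getD_eq_getElem _ _ (by omega)]
          have := hz final[k] (by exact List.getElem_mem _)
          simpa using this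
        have := hinv k hk
        rw [hg, hmf, hms, List.getD_replicate _ hk] at this
        omega
      · intro hperm x hxmem
        obtain ⟨i, hi, rfl⟩ := List.mem_iff_getElem.mp hxmem
        have hk : i < 10 := by omega
        have := hinv i hk
        rw [hmf, hms, List.getD_replicate _ hk,
            (pv_perm_iff_counts sa sb hda hdb).mp hperm i hk,
            List.getD_eq_getElem _ _ hi] at this
        simp [this]
    rw [Bool.eq_iff_iff, hAiff]
    simp [hlen, PySem.List.sorted_id_eq_sorted_id_iff_perm]
  · -- different string lengths: A returns at the early test, B's length conjunct is false
    rw [if_pos (by simp [PySem.List.len_eq, hlen])]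
    simp [hlen]

@[simp] theorem arePermutation2_raises : Claim_raises_arePermutation2 := by
  unfold Claim_raises_arePermutation2
  exact ⟨by
    intro a b _ hr hp
    rcases hr with ⟨hneg, hlen⟩
    rcases hp with ⟨ha, hb⟩ | hne
    · omega
    · exact hne hlen, by decide⟩
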